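-- pv_equiv track=rewrite | github.com/HoangMH1304/2048_Cross_Platform_Game | 2048_Scripts/main.py | check_turn_up
-- ===== SOURCE A (Python) =====
-- matrix_size = 4
--
-- def check_turn_up(board):
--     idx = -1
--     for j in range(matrix_size):
--         for i in range(matrix_size):
--             if board[i][j] <= 1: continue
--             if i == matrix_size - 1:
--                 if board[i - 1][j] == 0 and idx == -1:
--                     idx = j
--                     continue
--             for k in range(i + 1, matrix_size):
--                 if i > 0 and board[i - 1][j] == 0 and idx == -1:
--                     idx = j
--                 if board[i][j] != board[k][j] and board[k][j] != 0:
--                     break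
--                 if board[i][j] == board[k][j]:
--                     return j
--     return idx
-- ===== SOURCE B (Python) =====
-- matrix_size = 4
--
-- def _col_merges(c):
--     nz = [x for x in c if x != 0]
--     return any(a == b and a > 1 for a, b in zip(nz, nz[1:]))
--
-- def _col_slides(c):
--     return any(a == 0 and b > 1 for a, b in zip(c, c[1:]))
--
-- def check_turn_up(board):
--     cols = [[board[i][j] for i in range(matrix_size)] for j in range(matrix_size)]
--     for j, c in enumerate(cols):
--         if _col_merges(c):
--             return j
--     for j, c in enumerate(cols):
--         if _col_slides(c):
--             return j
--     return -1
-- ===== Notes on version B (the rewrite author's own statement) =====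
-- stated objective: simpler
-- what changed: A's single interleaved scan with a running idx accumulator and a nested break-scan is replaced by extracting each column once and running two separate passes over per-column predicates: first the lowest column with an adjacent equal non-zero pair > 1 (merge), then the lowest column with a zero directly above a cell > 1 (slide). Pre_ excludes jagged/short boards (not full 4x4): A usually raises IndexError there and only returns when its scan short-circuits before the first out-of-range read, while B reads all 16 cells up front and raises.
-- outside the precondition, e.g. on check_turn_up([[2, 1, -1], [1, 170], [4, -1], [4], [129, 3]]): A returns 0, B raises IndexError
import Mathlib
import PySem

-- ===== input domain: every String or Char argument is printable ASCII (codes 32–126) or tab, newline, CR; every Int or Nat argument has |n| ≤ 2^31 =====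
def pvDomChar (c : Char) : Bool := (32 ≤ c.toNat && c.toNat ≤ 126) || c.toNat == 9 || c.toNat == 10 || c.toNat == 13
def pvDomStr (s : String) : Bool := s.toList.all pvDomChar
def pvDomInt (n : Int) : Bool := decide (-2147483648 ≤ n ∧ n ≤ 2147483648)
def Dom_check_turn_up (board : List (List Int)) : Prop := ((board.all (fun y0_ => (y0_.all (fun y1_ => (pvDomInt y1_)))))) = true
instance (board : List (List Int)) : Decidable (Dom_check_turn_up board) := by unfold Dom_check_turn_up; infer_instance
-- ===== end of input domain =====

-- B replaces A's single interleaved scan (running idx and a nested k-scan with break) by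
-- extracting each column and testing two simple per-column predicates in two passes
-- (adjacent equal non-zero pair > 1 for a merge, zero directly above a cell > 1 for a slide).

-- ===== PORT A =====
-- board[i][j] (indices used are always 0..3; Pre_ guarantees they are in range)
def cellA (board : List (List Int)) (i j : Int) : Int :=
  PySem.List.pyGetD (PySem.List.pyGetD board i []) j 0

-- 'for k in range(i+1, 4)': returns (idx, some j) on 'return j', (idx, none) on break/exhaustion
def loopKA (board : List (List Int)) (j i : Int) : List Int → Int → Int × Option Int
  | [], idx => (idx, none)
  | k :: rest, idx =>
    let idx := if i > 0 ∧ cellA board (i-1) j = 0 ∧ idx = -1 then j else idx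
    if cellA board i j ≠ cellA board k j ∧ cellA board k j ≠ 0 then (idx, none)
    else if cellA board i j = cellA board k j then (idx, some j)
    else loopKA board j i rest idx

-- 'for i in range(4)'
def loopIA (board : List (List Int)) (j : Int) : List Int → Int → Int × Option Int
  | [], idx => (idx, none)
  | i :: rest, idx =>
    if cellA board i j ≤ 1 then loopIA board j rest idx
    else if i = 4 - 1 ∧ cellA board (i-1) j = 0 ∧ idx = -1 then loopIA board j rest j
    else
      match loopKA board j i (PySem.List.pyRange (i+1) 4 1) idx with
      | (idx', some r) => (idx', some r)
      | (idx', none) => loopIA board j rest idx'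

-- 'for j in range(4)'
def loopJA (board : List (List Int)) : List Int → Int → Int
  | [], idx => idx
  | j :: rest, idx =>
    match loopIA board j (PySem.List.pyRange 0 4 1) idx with
    | (_, some r) => r
    | (idx', none) => loopJA board rest idx'

def check_turn_up (board : List (List Int)) : Int :=
  loopJA board (PySem.List.pyRange 0 4 1) (-1)

-- ===== PORT B =====
def cellB (board : List (List Int)) (i j : Int) : Int :=
  PySem.List.pyGetD (PySem.List.pyGetD board i []) j 0

-- any(a == b and a > 1 for a, b in zip(nz, nz[1:])) with nz = non-zero entries of c
def colMergesB (c : List Int) : Bool :=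
  let nz := c.filter (fun x => x ≠ 0)
  (nz.zip (nz.drop 1)).any (fun p => p.1 = p.2 ∧ p.1 > 1)

-- any(a == 0 and b > 1 for a, b in zip(c, c[1:]))
def colSlidesB (c : List Int) : Bool :=
  (c.zip (c.drop 1)).any (fun p => p.1 = 0 ∧ p.2 > 1)

-- 'for j, c in enumerate(cols): if pred(c): return j'
def firstColB (pred : List Int → Bool) : List (Int × List Int) → Option Int
  | [] => none
  | (j, c) :: rest => if pred c then some j else firstColB pred rest

def check_turn_up_alt (board : List (List Int)) : Int :=
  let cols := (PySem.List.pyRange 0 4 1).map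
    (fun j => (PySem.List.pyRange 0 4 1).map (fun i => cellB board i j))
  let ecols := PySem.List.enumerate cols 0
  match firstColB colMergesB ecols with
  | some j => j
  | none =>
    match firstColB colSlidesB ecols with
    | some j => j
    | none => -1

-- ===== PRECONDITION & SPEC =====
-- Pre_ excludes jagged/short boards (fewer than 4 rows, or one of the first 4 rows shorter
-- than 4): A usually raises IndexError there and only returns when its scan short-circuits
-- before the first out-of-range read, while B reads all 16 cells up front and raises.
def Pre_check_turn_up (board : List (List Int)) : Prop :=
  4 ≤ board.length ∧ ∀ r ∈ board.take 4, 4 ≤ r.length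
instance (board : List (List Int)) : Decidable (Pre_check_turn_up board) := by
  unfold Pre_check_turn_up; infer_instance

def pvWitness_check_turn_up : List (List Int) :=
  [[0, 2, 0, 0], [2, 0, 0, 0], [0, 0, 4, 0], [0, 0, 4, 2]]

def Spec_check_turn_up (board : List (List Int)) (out : Int) : Prop := out = check_turn_up_alt board
instance (board : List (List Int)) (out : Int) : Decidable (Spec_check_turn_up board out) := by unfold Spec_check_turn_up; infer_instance

-- ===== CLAIM (what is proved, stated in full; the proofs are below) =====
def Claim_equal_check_turn_up : Prop := ∀ (board : List (List Int)), Dom_check_turn_up board → Pre_check_turn_up board → Spec_check_turn_up board (check_turn_up board)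

-- ===== LEMMAS AND PROOFS =====

-- first non-zero entry of a list (the cell a merge candidate would combine with)
def fnz (l : List Int) : Option Int := (l.filter (fun x => x ≠ 0)).head?

theorem K0 (board : List (List Int)) (j idx : Int) (h : 1 < cellA board 0 j) :
    loopKA board j 0 [1,2,3] idx =
      (idx, if fnz [cellA board 1 j, cellA board 2 j, cellA board 3 j] = some (cellA board 0 j)
            then some j else none) := by
  simp only [loopKA, fnz]
  norm_num
  set a := cellA board 0 j
  set b := cellA board 1 j
  set c := cellA board 2 j
  set d := cellA board 3 j
  split_ifs <;> simp_all

theorem K1 (board : List (List Int)) (j idx : Int) (h : 1 < cellA board 1 j) :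
    loopKA board j 1 [2,3] idx =
      (if cellA board 0 j = 0 ∧ idx = -1 then j else idx,
       if fnz [cellA board 2 j, cellA board 3 j] = some (cellA board 1 j) then some j else none) := by
  simp only [loopKA, fnz]
  norm_num
  set a := cellA board 0 j
  set b := cellA board 1 j
  set c := cellA board 2 j
  set d := cellA board 3 j
  split_ifs <;> simp_all

set_option maxHeartbeats 1000000 in
theorem L2 (board : List (List Int)) (j idx : Int) :
    ((1 < cellA board 2 j ∧ fnz [cellA board 3 j] = some (cellA board 2 j)) ∧
       (loopIA board j [2,3] idx).2 = some j) ∨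
    (¬(1 < cellA board 2 j ∧ fnz [cellA board 3 j] = some (cellA board 2 j)) ∧
       loopIA board j [2,3] idx =
         (if idx = -1 ∧ ((1 < cellA board 2 j ∧ cellA board 1 j = 0) ∨
                         (1 < cellA board 3 j ∧ cellA board 2 j = 0)) then j else idx, none)) := by
  have hr3 : PySem.List.pyRange (2+1) 4 1 = [(3:Int)] := by decide
  have hr4 : PySem.List.pyRange (3+1) 4 1 = ([] : List Int) := by decide
  simp only [loopIA, hr3, hr4, loopKA, fnz]
  norm_num
  set b := cellA board 1 j
  set c := cellA board 2 j
  set d := cellA board 3 j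
  split_ifs <;> simp_all <;> omega

theorem slideB_iff (a b c d : Int) :
    colSlidesB [a,b,c,d] = true ↔
      ((1 < b ∧ a = 0) ∨ (1 < c ∧ b = 0) ∨ (1 < d ∧ c = 0)) := by
  simp [colSlidesB]; tauto

theorem mergeB_iff (a b c d : Int) :
    colMergesB [a,b,c,d] = true ↔
      ((1 < a ∧ fnz [b,c,d] = some a) ∨ (1 < b ∧ fnz [c,d] = some b) ∨
       (1 < c ∧ fnz [d] = some c)) := by
  by_cases ha0 : a = 0 <;> by_cases hb0 : b = 0 <;> by_cases hc0 : c = 0 <;> by_cases hd0 : d = 0 <;>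
    simp_all [colMergesB, fnz] <;> omega

set_option maxHeartbeats 1000000 in
theorem L1 (board : List (List Int)) (j idx : Int) :
    (((1 < cellA board 1 j ∧ fnz [cellA board 2 j, cellA board 3 j] = some (cellA board 1 j)) ∨
      (1 < cellA board 2 j ∧ fnz [cellA board 3 j] = some (cellA board 2 j))) ∧
       (loopIA board j [1,2,3] idx).2 = some j) ∨
    (¬((1 < cellA board 1 j ∧ fnz [cellA board 2 j, cellA board 3 j] = some (cellA board 1 j)) ∨
       (1 < cellA board 2 j ∧ fnz [cellA board 3 j] = some (cellA board 2 j))) ∧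
       loopIA board j [1,2,3] idx =
         (if idx = -1 ∧ ((1 < cellA board 1 j ∧ cellA board 0 j = 0) ∨
                         (1 < cellA board 2 j ∧ cellA board 1 j = 0) ∨
                         (1 < cellA board 3 j ∧ cellA board 2 j = 0)) then j else idx, none)) := by
  have hr2 : PySem.List.pyRange (1+1) 4 1 = [(2:Int),3] := by decide
  by_cases hb : cellA board 1 j ≤ 1
  · have step : loopIA board j [1,2,3] idx = loopIA board j [2,3] idx := by
      rw [loopIA, if_pos hb]
    rcases L2 board j idx with ⟨h1, h2⟩ | ⟨h1, h2⟩
    · exact Or.inl ⟨Or.inr h1, by rw [step]; exact h2⟩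
    · refine Or.inr ⟨?_, ?_⟩
      · rintro (⟨hb1, _⟩ | hm2); · omega
        exact h1 hm2
      · rw [step, h2]
        congr 1
        split_ifs <;> first | rfl | omega
  · have hb' : 1 < cellA board 1 j := by omega
    have step : loopIA board j [1,2,3] idx =
        match loopKA board j 1 (PySem.List.pyRange (1+1) 4 1) idx with
        | (idx', some r) => (idx', some r)
        | (idx', none) => loopIA board j [2,3] idx' := by
      rw [loopIA, if_neg hb, if_neg (by norm_num)]
    rw [hr2, K1 board j idx hb'] at step
    by_cases hm1 : fnz [cellA board 2 j, cellA board 3 j] = some (cellA board 1 j)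
    · rw [if_pos hm1] at step
      exact Or.inl ⟨Or.inl ⟨hb', hm1⟩, by rw [step]⟩
    · rw [if_neg hm1] at step
      rcases L2 board j (if cellA board 0 j = 0 ∧ idx = -1 then j else idx) with ⟨h1, h2⟩ | ⟨h1, h2⟩
      · refine Or.inl ⟨Or.inr h1, ?_⟩
        rw [step]
        dsimp only
        rw [h2]
      · refine Or.inr ⟨?_, ?_⟩
        · rintro (⟨_, hm⟩ | hm2); · exact hm1 hm
          exact h1 hm2
        · rw [step]
          dsimp only
          rw [h2]
          congr 1
          split_ifs <;> first | rfl | omega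

-- column j of the board, as B extracts it
def colOf (board : List (List Int)) (j : Int) : List Int :=
  [cellA board 0 j, cellA board 1 j, cellA board 2 j, cellA board 3 j]

set_option maxHeartbeats 1000000 in
theorem loopIA_char (board : List (List Int)) (j idx : Int) :
    (colMergesB (colOf board j) = true ∧
       (loopIA board j (PySem.List.pyRange 0 4 1) idx).2 = some j) ∨
    (colMergesB (colOf board j) = false ∧
       loopIA board j (PySem.List.pyRange 0 4 1) idx =
         (if idx = -1 ∧ colSlidesB (colOf board j) = true then j else idx, none)) := by
  have r04 : PySem.List.pyRange 0 4 1 = [(0:Int),1,2,3] := by decide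
  have r14 : PySem.List.pyRange (0+1) 4 1 = [(1:Int),2,3] := by decide
  rw [r04]
  have hM := mergeB_iff (cellA board 0 j) (cellA board 1 j) (cellA board 2 j) (cellA board 3 j)
  have hS := slideB_iff (cellA board 0 j) (cellA board 1 j) (cellA board 2 j) (cellA board 3 j)
  by_cases ha : cellA board 0 j ≤ 1
  · have step : loopIA board j [0,1,2,3] idx = loopIA board j [1,2,3] idx := by
      rw [loopIA, if_pos ha]
    rcases L1 board j idx with ⟨h1, h2⟩ | ⟨h1, h2⟩
    · refine Or.inl ⟨hM.mpr (Or.inr h1), ?_⟩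
      rw [step]; exact h2
    · refine Or.inr ⟨?_, ?_⟩
      · refine Bool.eq_false_iff.mpr (fun h => ?_)
        rcases hM.mp h with hm | hm
        · omega
        · exact h1 hm
      · rw [step, h2]
        simp only [colOf, hS]
  · have ha' : 1 < cellA board 0 j := by omega
    have step : loopIA board j [0,1,2,3] idx =
        match loopKA board j 0 (PySem.List.pyRange (0+1) 4 1) idx with
        | (idx', some r) => (idx', some r)
        | (idx', none) => loopIA board j [1,2,3] idx' := by
      rw [loopIA, if_neg ha, if_neg (by norm_num)]
    rw [r14, K0 board j idx ha'] at step
    by_cases hm0 : fnz [cellA board 1 j, cellA board 2 j, cellA board 3 j] = some (cellA board 0 j)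
    · rw [if_pos hm0] at step
      exact Or.inl ⟨hM.mpr (Or.inl ⟨ha', hm0⟩), by rw [step]⟩
    · rw [if_neg hm0] at step
      rcases L1 board j idx with ⟨h1, h2⟩ | ⟨h1, h2⟩
      · refine Or.inl ⟨hM.mpr (Or.inr h1), ?_⟩
        rw [step]
        dsimp only
        exact h2
      · refine Or.inr ⟨?_, ?_⟩
        · refine Bool.eq_false_iff.mpr (fun h => ?_)
          rcases hM.mp h with hm | hm
          · exact hm0 hm.2
          · exact h1 hm
        · rw [step]
          dsimp only
          rw [h2]
          simp only [colOf, hS]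

set_option maxHeartbeats 1000000 in
theorem main_eq (board : List (List Int)) :
    check_turn_up board = check_turn_up_alt board := by
  have r04 : PySem.List.pyRange 0 4 1 = [(0:Int),1,2,3] := by decide
  have halt : check_turn_up_alt board =
      (match firstColB colMergesB
          [((0:Int), colOf board 0), (1, colOf board 1), (2, colOf board 2), (3, colOf board 3)] with
       | some j => j
       | none =>
         match firstColB colSlidesB
             [((0:Int), colOf board 0), (1, colOf board 1), (2, colOf board 2), (3, colOf board 3)] with
         | some j => j
         | none => -1) := by
    simp only [check_turn_up_alt, r04, List.map, PySem.List.enumerate_cons,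
      PySem.List.enumerate_nil, colOf, cellB, cellA]
    norm_num
  rw [halt]
  unfold check_turn_up
  rw [r04]
  -- column 0
  rcases loopIA_char board 0 (-1) with ⟨hm0, h2⟩ | ⟨hm0, heq0⟩
  · rcases hv : loopIA board 0 (PySem.List.pyRange 0 4 1) (-1) with ⟨i1, o1⟩
    rw [hv] at h2; dsimp only at h2; subst h2
    rw [loopJA, hv]
    simp [firstColB, hm0]
  · cases hs0 : colSlidesB (colOf board 0) <;> rw [hs0] at heq0 <;> simp only [] at heq0 <;>
      norm_num at heq0
    · -- no slide in column 0, idx stays -1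
      rw [loopJA, heq0]
      dsimp only
      -- column 1
      rcases loopIA_char board 1 (-1) with ⟨hm1, h2⟩ | ⟨hm1, heq1⟩
      · rcases hv : loopIA board 1 (PySem.List.pyRange 0 4 1) (-1) with ⟨i1, o1⟩
        rw [hv] at h2; dsimp only at h2; subst h2
        rw [loopJA, hv]
        simp [firstColB, hm0, hm1]
      · cases hs1 : colSlidesB (colOf board 1) <;> rw [hs1] at heq1 <;> norm_num at heq1
        · rw [loopJA, heq1]
          dsimp only
          -- column 2
          rcases loopIA_char board 2 (-1) with ⟨hm2, h2⟩ | ⟨hm2, heq2⟩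
          · rcases hv : loopIA board 2 (PySem.List.pyRange 0 4 1) (-1) with ⟨i1, o1⟩
            rw [hv] at h2; dsimp only at h2; subst h2
            rw [loopJA, hv]
            simp [firstColB, hm0, hm1, hm2]
          · cases hs2 : colSlidesB (colOf board 2) <;> rw [hs2] at heq2 <;> norm_num at heq2
            · rw [loopJA, heq2]
              dsimp only
              -- column 3
              rcases loopIA_char board 3 (-1) with ⟨hm3, h2⟩ | ⟨hm3, heq3⟩
              · rcases hv : loopIA board 3 (PySem.List.pyRange 0 4 1) (-1) with ⟨i1, o1⟩
                rw [hv] at h2; dsimp only at h2; subst h2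
                rw [loopJA, hv]
                simp [firstColB, hm0, hm1, hm2, hm3]
              · cases hs3 : colSlidesB (colOf board 3) <;> rw [hs3] at heq3 <;> norm_num at heq3
                · rw [loopJA, heq3]
                  simp [loopJA, firstColB, hm0, hm1, hm2, hm3, hs0, hs1, hs2, hs3]
                · rw [loopJA, heq3]
                  simp [loopJA, firstColB, hm0, hm1, hm2, hm3, hs0, hs1, hs2, hs3]
            · rw [loopJA, heq2]
              dsimp only
              rcases loopIA_char board 3 2 with ⟨hm3, h2⟩ | ⟨hm3, heq3⟩
              · rcases hv : loopIA board 3 (PySem.List.pyRange 0 4 1) 2 with ⟨i1, o1⟩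
                rw [hv] at h2; dsimp only at h2; subst h2
                rw [loopJA, hv]
                simp [firstColB, hm0, hm1, hm2, hm3]
              · norm_num at heq3
                rw [loopJA, heq3]
                simp [loopJA, firstColB, hm0, hm1, hm2, hm3, hs0, hs1, hs2]
        · rw [loopJA, heq1]
          dsimp only
          rcases loopIA_char board 2 1 with ⟨hm2, h2⟩ | ⟨hm2, heq2⟩
          · rcases hv : loopIA board 2 (PySem.List.pyRange 0 4 1) 1 with ⟨i1, o1⟩
            rw [hv] at h2; dsimp only at h2; subst h2
            rw [loopJA, hv]
            simp [firstColB, hm0, hm1, hm2]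
          · norm_num at heq2
            rw [loopJA, heq2]
            dsimp only
            rcases loopIA_char board 3 1 with ⟨hm3, h2⟩ | ⟨hm3, heq3⟩
            · rcases hv : loopIA board 3 (PySem.List.pyRange 0 4 1) 1 with ⟨i1, o1⟩
              rw [hv] at h2; dsimp only at h2; subst h2
              rw [loopJA, hv]
              simp [firstColB, hm0, hm1, hm2, hm3]
            · norm_num at heq3
              rw [loopJA, heq3]
              simp [loopJA, firstColB, hm0, hm1, hm2, hm3, hs0, hs1]
    · -- slide found in column 0, idx becomes 0
      rw [loopJA, heq0]
      dsimp only
      rcases loopIA_char board 1 0 with ⟨hm1, h2⟩ | ⟨hm1, heq1⟩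
      · rcases hv : loopIA board 1 (PySem.List.pyRange 0 4 1) 0 with ⟨i1, o1⟩
        rw [hv] at h2; dsimp only at h2; subst h2
        rw [loopJA, hv]
        simp [firstColB, hm0, hm1]
      · norm_num at heq1
        rw [loopJA, heq1]
        dsimp only
        rcases loopIA_char board 2 0 with ⟨hm2, h2⟩ | ⟨hm2, heq2⟩
        · rcases hv : loopIA board 2 (PySem.List.pyRange 0 4 1) 0 with ⟨i1, o1⟩
          rw [hv] at h2; dsimp only at h2; subst h2
          rw [loopJA, hv]
          simp [firstColB, hm0, hm1, hm2]
        · norm_num at heq2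
          rw [loopJA, heq2]
          dsimp only
          rcases loopIA_char board 3 0 with ⟨hm3, h2⟩ | ⟨hm3, heq3⟩
          · rcases hv : loopIA board 3 (PySem.List.pyRange 0 4 1) 0 with ⟨i1, o1⟩
            rw [hv] at h2; dsimp only at h2; subst h2
            rw [loopJA, hv]
            simp [firstColB, hm0, hm1, hm2, hm3]
          · norm_num at heq3
            rw [loopJA, heq3]
            simp [loopJA, firstColB, hm0, hm1, hm2, hm3, hs0]

-- ===== VERDICT (by name: the statement is the Claim_ definition above) =====
theorem check_turn_up_spec : Claim_equal_check_turn_up := by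
  intro board _ _
  unfold Spec_check_turn_up
  exact main_eq board
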